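-- pv_equiv track=rewrite | github.com/skajd1/baekjoon | 프로그래머스/3/152995. 인사고과/인사고과.py | solution
-- ===== SOURCE A (Python) =====
-- def solution(scores):
--     answer = 0
--     tmp = sorted(scores[1:], key = lambda x : (-x[0],x[1]))
--     if not tmp : return 1
--     threshold = tmp[0][1]
--     incentive = []
--     left = tmp[0][0]
--     for l,r in tmp :
--         if l > scores[0][0] and r > scores[0][1] : return -1
--         if threshold <= r :
--             incentive.append(l+r)
--             threshold = r
--     incentive.sort(reverse=True)
--
--     for i,x in enumerate(incentive):
--         if scores[0][0] + scores[0][1] >= x: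
--             return i+1
--     return len(incentive) + 1
-- ===== SOURCE B (Python) =====
-- def solution(scores):
--     others = scores[1:]
--     if not others:
--         return 1
--     s0, s1 = scores[0][0], scores[0][1]
--     if any(l > s0 and r > s1 for l, r in others):
--         return -1
--     target = s0 + s1
--     return 1 + sum(1 for l, r in others
--                    if l + r > target and not any(a > l and b > r for a, b in others))
-- ===== Notes on version B (the rewrite author's own statement) =====
-- stated objective: alternative
-- what changed: B removes both sorts and the Pareto-front threshold walk entirely: it returns -1 if any other employee strictly dominates employee 0, and otherwise counts, by a direct quantifier over the list, the employees whose sum beats the target and who are strictly dominated by nobody (which is exactly the set the front walk keeps).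
import Mathlib
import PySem

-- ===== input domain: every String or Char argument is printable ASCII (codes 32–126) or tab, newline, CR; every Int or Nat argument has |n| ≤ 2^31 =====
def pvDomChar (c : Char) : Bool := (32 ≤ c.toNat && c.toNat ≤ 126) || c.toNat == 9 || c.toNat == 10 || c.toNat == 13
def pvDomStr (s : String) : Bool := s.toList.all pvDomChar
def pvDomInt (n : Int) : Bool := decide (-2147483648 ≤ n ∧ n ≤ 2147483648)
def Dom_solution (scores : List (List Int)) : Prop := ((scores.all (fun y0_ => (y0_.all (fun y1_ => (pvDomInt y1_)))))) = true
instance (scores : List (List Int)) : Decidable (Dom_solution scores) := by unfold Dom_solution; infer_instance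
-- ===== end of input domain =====

-- B drops both sorts and the threshold walk: it counts directly, by a quantifier over the
-- list, the non-dominated employees whose sum beats the target (objective: alternative).

-- ===== PORT A =====
-- the 'for l,r in tmp' loop: builds the incentive list; 'none' = 'return -1'.
-- 'l, r = row' is exact via pyGetD because Pre_ forces every tail row to have length exactly 2.
def pvLoopA (s0 s1 : Int) (threshold : Int) (inc : List Int) : List (List Int) → Option (List Int)
  | [] => some inc
  | row :: rest =>
    let l := PySem.List.pyGetD row 0 0
    let r := PySem.List.pyGetD row 1 0
    if l > s0 ∧ r > s1 then none
    else if threshold ≤ r then pvLoopA s0 s1 r (inc ++ [l + r]) rest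
    else pvLoopA s0 s1 threshold inc rest

-- the 'for i,x in enumerate(incentive)' scan
def pvScanA (target : Int) (i : Int) : List Int → Int
  | [] => i + 1
  | x :: rest => if target ≥ x then i + 1 else pvScanA target (i + 1) rest

def solution (scores : List (List Int)) : Int :=
  let tmp := PySem.List.sorted2 (PySem.List.slice scores (some 1) none)
      (fun x => -(PySem.List.pyGetD x 0 0)) (fun x => PySem.List.pyGetD x 1 0)
  match tmp with
  | [] => 1
  | t0 :: _ =>
    let s0 := PySem.List.pyGetD (PySem.List.pyGetD scores 0 []) 0 0
    let s1 := PySem.List.pyGetD (PySem.List.pyGetD scores 0 []) 1 0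
    match pvLoopA s0 s1 (PySem.List.pyGetD t0 1 0) [] tmp with
    | none => -1
    | some inc => pvScanA (s0 + s1) 0 (PySem.List.sorted inc (fun x => x) true)

-- ===== PORT B =====
-- Source B: no sort; -1 on strict domination, else count the non-dominated rows beating the target
def solution_alt (scores : List (List Int)) : Int :=
  let others := PySem.List.slice scores (some 1) none
  if others.isEmpty then 1
  else
    let s0 := PySem.List.pyGetD (PySem.List.pyGetD scores 0 []) 0 0
    let s1 := PySem.List.pyGetD (PySem.List.pyGetD scores 0 []) 1 0
    if others.any (fun row =>
        decide (PySem.List.pyGetD row 0 0 > s0) && decide (PySem.List.pyGetD row 1 0 > s1)) then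
      -1
    else
      let target := s0 + s1
      1 + ((others.countP (fun row =>
        decide (PySem.List.pyGetD row 0 0 + PySem.List.pyGetD row 1 0 > target) &&
        !(others.any (fun q =>
            decide (PySem.List.pyGetD q 0 0 > PySem.List.pyGetD row 0 0) &&
            decide (PySem.List.pyGetD q 1 0 > PySem.List.pyGetD row 1 0))))) : Int)

-- ===== PRECONDITION & SPEC =====
-- Pre_ excludes exactly the inputs where Python A raises: with at least two rows, every tail row
-- must have length exactly 2 ('l, r = row' unpacking) and the first row length at least 2.
def Pre_solution (scores : List (List Int)) : Prop :=
  scores.length ≤ 1 ∨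
    (2 ≤ (scores.headD []).length ∧ ∀ row ∈ scores.tail, row.length = 2)
instance (scores : List (List Int)) : Decidable (Pre_solution scores) := by
  unfold Pre_solution; infer_instance

def pvWitness_solution : List (List Int) := [[2, 2], [1, 4], [3, 2], [3, 2], [2, 1]]

def Spec_solution (scores : List (List Int)) (out : Int) : Prop := out = solution_alt scores
instance (scores : List (List Int)) (out : Int) : Decidable (Spec_solution scores out) := by
  unfold Spec_solution; infer_instance

-- ===== CLAIM (what is proved, stated in full; the proofs are below) =====
def Claim_equal_solution : Prop :=
  ∀ (scores : List (List Int)), Dom_solution scores → Pre_solution scores →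
    Spec_solution scores (solution scores)

-- ===== LEMMAS AND PROOFS =====

-- abbreviations for the two unpacked components of a row
def pvL (row : List Int) : Int := PySem.List.pyGetD row 0 0
def pvR (row : List Int) : Int := PySem.List.pyGetD row 1 0

-- the Pareto-front walk of A, isolated from the -1 check
def pvFront (th : Int) : List (List Int) → List (List Int)
  | [] => []
  | row :: rest => if th ≤ pvR row then row :: pvFront (pvR row) rest else pvFront th rest

-- insertBy keeps a list sorted (before = strict "comes earlier", asymmetric and transitive)
theorem pairwise_insertBy {α : Type} (before : α → α → Bool)
    (H1 : ∀ a b, before a b = true → before b a = false)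
    (H2 : ∀ a b c, before a b = true → before b c = true → before a c = true)
    (x : α) (ys : List α) (h : ys.Pairwise (fun a b => before b a = false)) :
    (PySem.List.insertBy before x ys).Pairwise (fun a b => before b a = false) := by
  induction ys with
  | nil => simp [PySem.List.insertBy]
  | cons y ys ih =>
    rcases List.pairwise_cons.mp h with ⟨hy, hys⟩
    by_cases hb : before x y = true
    · rw [show PySem.List.insertBy before x (y :: ys) = x :: y :: ys by
        simp [PySem.List.insertBy, hb]]
      refine List.pairwise_cons.mpr ⟨?_, h⟩
      intro z hz
      rcases List.mem_cons.mp hz with hzy | hz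
      · subst hzy; exact H1 _ _ hb
      · by_contra hzx
        have hzx' : before z x = true := by
          cases hzx'' : before z x with
          | true => rfl
          | false => exact absurd hzx'' hzx
        have := H2 z x y hzx' hb
        rw [hy z hz] at this; exact Bool.false_ne_true this
    · have hb' : before x y = false := by
        cases hb'' : before x y with
        | true => exact absurd hb'' hb
        | false => rfl
      rw [show PySem.List.insertBy before x (y :: ys) = y :: PySem.List.insertBy before x ys by
        simp [PySem.List.insertBy, hb']]
      refine List.pairwise_cons.mpr ⟨?_, ih hys⟩
      intro z hz
      rcases (PySem.List.mem_insertBy before x z ys).mp hz with rfl | hz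
      · exact hb'
      · exact hy z hz

theorem pairwise_foldl_insertBy {α : Type} (before : α → α → Bool)
    (H1 : ∀ a b, before a b = true → before b a = false)
    (H2 : ∀ a b c, before a b = true → before b c = true → before a c = true)
    (xs : List α) :
    ∀ acc, acc.Pairwise (fun a b => before b a = false) →
      (xs.foldl (fun acc x => PySem.List.insertBy before x acc) acc).Pairwise
        (fun a b => before b a = false) := by
  induction xs with
  | nil => intro acc h; exact h
  | cons x xs ih =>
    intro acc h
    exact ih _ (pairwise_insertBy before H1 H2 x acc h)

-- the sorted order of tmp: l descending, ties r ascending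
theorem tmp_pairwise (xs : List (List Int)) :
    (PySem.List.sorted2 xs (fun x => -(PySem.List.pyGetD x 0 0))
        (fun x => PySem.List.pyGetD x 1 0)).Pairwise
      (fun a b => pvL a > pvL b ∨ (pvL a = pvL b ∧ pvR a ≤ pvR b)) := by
  have h := pairwise_foldl_insertBy
      (fun a b : List Int => decide (-(PySem.List.pyGetD a 0 0) < -(PySem.List.pyGetD b 0 0)) ||
        (!decide (-(PySem.List.pyGetD b 0 0) < -(PySem.List.pyGetD a 0 0)) &&
          decide (PySem.List.pyGetD a 1 0 < PySem.List.pyGetD b 1 0)))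
      (by intro a b hab; revert hab; simp; omega)
      (by intro a b c hab hbc; revert hab hbc; simp; omega)
      xs [] List.Pairwise.nil
  have heq : PySem.List.sorted2 xs (fun x => -(PySem.List.pyGetD x 0 0))
      (fun x => PySem.List.pyGetD x 1 0)
      = xs.foldl (fun acc x => PySem.List.insertBy
          (fun a b : List Int => decide (-(PySem.List.pyGetD a 0 0) < -(PySem.List.pyGetD b 0 0)) ||
            (!decide (-(PySem.List.pyGetD b 0 0) < -(PySem.List.pyGetD a 0 0)) &&
              decide (PySem.List.pyGetD a 1 0 < PySem.List.pyGetD b 1 0))) x acc) [] := rfl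
  rw [heq]
  refine h.imp ?_
  intro a b hab
  revert hab
  simp [pvL, pvR]
  omega

-- A's loop returns None exactly when a strictly dominating row occurs
theorem pvLoopA_none_iff (s0 s1 : Int) (rows : List (List Int)) :
    ∀ th inc, pvLoopA s0 s1 th inc rows = none ↔
      ∃ row ∈ rows, pvL row > s0 ∧ pvR row > s1 := by
  induction rows with
  | nil => intro th inc; simp [pvLoopA]
  | cons row rest ih =>
    intro th inc
    simp only [pvLoopA]
    split_ifs with h1 h2
    · simp only [true_iff]
      exact ⟨row, List.mem_cons_self, h1⟩
    · rw [ih]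
      constructor
      · rintro ⟨q, hq, hd⟩; exact ⟨q, List.mem_cons_of_mem _ hq, hd⟩
      · rintro ⟨q, hq, hd⟩
        rcases List.mem_cons.mp hq with rfl | hq
        · exact absurd hd h1
        · exact ⟨q, hq, hd⟩
    · rw [ih]
      constructor
      · rintro ⟨q, hq, hd⟩; exact ⟨q, List.mem_cons_of_mem _ hq, hd⟩
      · rintro ⟨q, hq, hd⟩
        rcases List.mem_cons.mp hq with rfl | hq
        · exact absurd hd h1
        · exact ⟨q, hq, hd⟩

-- with no dominating row, A's loop is the front walk, summed
theorem pvLoopA_eq_some (s0 s1 : Int) (rows : List (List Int))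
    (hnd : ∀ row ∈ rows, ¬(pvL row > s0 ∧ pvR row > s1)) :
    ∀ th inc, pvLoopA s0 s1 th inc rows
      = some (inc ++ (pvFront th rows).map (fun row => pvL row + pvR row)) := by
  induction rows with
  | nil => intro th inc; simp [pvLoopA, pvFront]
  | cons row rest ih =>
    intro th inc
    have hrow := hnd row List.mem_cons_self
    have hrest : ∀ q ∈ rest, ¬(pvL q > s0 ∧ pvR q > s1) :=
      fun q hq => hnd q (List.mem_cons_of_mem _ hq)
    simp only [pvLoopA, pvFront]
    simp only [pvL, pvR] at hrow hrest ih ⊢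
    rw [if_neg hrow]
    by_cases h2 : th ≤ PySem.List.pyGetD row 1 0
    · rw [if_pos h2, if_pos h2, ih hrest]
      simp
    · rw [if_neg h2, if_neg h2, ih hrest]

-- on a sorted list, the front walk is a filter: kept iff r clears the threshold and
-- no row with strictly larger l has strictly larger r
theorem pvFront_eq_filter (rows : List (List Int))
    (hs : rows.Pairwise (fun a b => pvL a > pvL b ∨ (pvL a = pvL b ∧ pvR a ≤ pvR b))) :
    ∀ th, pvFront th rows = rows.filter (fun row =>
      decide (th ≤ pvR row) &&
        rows.all (fun q => !decide (pvL q > pvL row) || decide (pvR q ≤ pvR row))) := by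
  induction rows with
  | nil => intro th; simp [pvFront]
  | cons row rest ih =>
    intro th
    rcases List.pairwise_cons.mp hs with ⟨hrow, hrest⟩
    simp only [pvFront]
    by_cases h2 : th ≤ pvR row
    · rw [if_pos h2]
      have hhead : (decide (th ≤ pvR row) &&
          (row :: rest).all (fun q => !decide (pvL q > pvL row) || decide (pvR q ≤ pvR row))) = true := by
        simp only [List.all_cons, Bool.and_eq_true, Bool.or_eq_true, Bool.not_eq_eq_eq_not,
          Bool.not_true, decide_eq_false_iff_not, decide_eq_true_eq, List.all_eq_true]
        refine ⟨h2, Or.inl (by omega), ?_⟩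
        intro q hq
        have := hrow q hq
        omega
      rw [List.filter_cons, if_pos hhead, ih hrest]
      congr 1
      apply List.filter_congr
      intro x hx
      have hrx := hrow x hx
      rw [Bool.eq_iff_iff]
      simp only [List.all_cons, Bool.and_eq_true, Bool.or_eq_true, Bool.not_eq_eq_eq_not,
        Bool.not_true, decide_eq_false_iff_not, decide_eq_true_eq, List.all_eq_true]
      constructor
      · rintro ⟨h1, hall⟩
        exact ⟨by omega, Or.inr h1, hall⟩
      · rintro ⟨ha, hb, hall⟩
        refine ⟨?_, hall⟩
        omega
    · rw [if_neg h2]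
      rw [List.filter_cons, if_neg (by simp [h2]), ih hrest]
      apply List.filter_congr
      intro x hx
      have hrx := hrow x hx
      rw [Bool.eq_iff_iff]
      simp only [List.all_cons, Bool.and_eq_true, Bool.or_eq_true, Bool.not_eq_eq_eq_not,
        Bool.not_true, decide_eq_false_iff_not, decide_eq_true_eq, List.all_eq_true]
      constructor
      · rintro ⟨h1, hall⟩
        exact ⟨h1, Or.inr (by omega), hall⟩
      · rintro ⟨ha, _, hall⟩
        exact ⟨ha, hall⟩

-- A's enumerate scan over a descending list returns (count of elements > target) + 1
theorem pvScanA_desc' (xs : List Int) (h : xs.Pairwise (fun a b => b ≤ a)) (target i : Int) :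
    pvScanA target i xs = i + (xs.countP (fun x => decide (target < x)) : Int) + 1 := by
  induction xs generalizing i with
  | nil => simp [pvScanA]
  | cons x rest ih =>
    rcases List.pairwise_cons.mp h with ⟨hx, hrest⟩
    simp only [pvScanA, List.countP_cons]
    by_cases hle : target ≥ x
    · rw [if_pos hle]
      have h0 : rest.countP (fun y => decide (target < y)) = 0 := by
        apply List.countP_eq_zero.mpr
        intro y hy
        simp only [decide_eq_true_eq, not_lt]
        exact le_trans (hx y hy) hle
      have hx0 : ¬ target < x := not_lt.mpr hle
      simp [h0, hx0]
    · rw [if_neg hle]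
      rw [ih hrest (i + 1)]
      have : target < x := lt_of_not_ge hle
      simp only [this, decide_true]
      push_cast
      omega

-- ===== VERDICT (by name: the statement is the Claim_ definition above) =====
theorem solution_spec : Claim_equal_solution := by
  intro scores _ _
  unfold Spec_solution solution solution_alt
  set others := PySem.List.slice scores (some 1) none with hothers
  set s0 := PySem.List.pyGetD (PySem.List.pyGetD scores 0 []) 0 0 with hs0
  set s1 := PySem.List.pyGetD (PySem.List.pyGetD scores 0 []) 1 0 with hs1
  have hperm : (PySem.List.sorted2 others
      (fun x => -(PySem.List.pyGetD x 0 0)) (fun x => PySem.List.pyGetD x 1 0)).Perm others :=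
    PySem.List.sorted2_perm others _ _ false
  cases htmp : PySem.List.sorted2 others
      (fun x => -(PySem.List.pyGetD x 0 0)) (fun x => PySem.List.pyGetD x 1 0) with
  | nil =>
    rw [htmp] at hperm
    have : others = [] := hperm.symm.eq_nil
    rw [if_pos (by simp [this])]
  | cons t0 rest =>
    rw [htmp] at hperm
    have hne : others.isEmpty = false := by
      cases h : others with
      | nil => rw [h] at hperm; exact absurd hperm.eq_nil (by simp)
      | cons a b => rfl
    rw [if_neg (by simp [hne])]
    dsimp only
    have hpw := tmp_pairwise others
    rw [htmp] at hpw
    by_cases hdom : ∃ row ∈ others, pvL row > s0 ∧ pvR row > s1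
    · -- A hits the -1 return; B's any is true
      have hdomT : ∃ row ∈ t0 :: rest, pvL row > s0 ∧ pvR row > s1 := by
        rcases hdom with ⟨q, hq, hd⟩
        exact ⟨q, hperm.mem_iff.mpr hq, hd⟩
      rw [(pvLoopA_none_iff s0 s1 (t0 :: rest) _ []).mpr hdomT]
      rw [if_pos (by
        rcases hdom with ⟨q, hq, hd⟩
        refine List.any_eq_true.mpr ⟨q, hq, ?_⟩
        simp only [Bool.and_eq_true, decide_eq_true_eq]
        exact hd)]
    · -- no domination: both count
      have hndT : ∀ row ∈ t0 :: rest, ¬(pvL row > s0 ∧ pvR row > s1) := by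
        intro row hrow hd
        exact hdom ⟨row, hperm.mem_iff.mp hrow, hd⟩
      rw [pvLoopA_eq_some s0 s1 (t0 :: rest) hndT _ []]
      rw [if_neg (by
        intro hany
        rcases List.any_eq_true.mp hany with ⟨q, hq, hd⟩
        simp only [Bool.and_eq_true, decide_eq_true_eq] at hd
        exact hdom ⟨q, hq, hd⟩)]
      dsimp only [List.nil_append]
      -- the incentive list, sorted descending, scanned
      have hdesc := PySem.List.sorted_pairwise_rev
        ((pvFront (PySem.List.pyGetD t0 1 0) (t0 :: rest)).map (fun row => pvL row + pvR row))
        (fun x : Int => x)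
      rw [pvScanA_desc' _ hdesc (s0 + s1) 0]
      have hpermInc := PySem.List.sorted_perm
        ((pvFront (PySem.List.pyGetD t0 1 0) (t0 :: rest)).map (fun row => pvL row + pvR row))
        (fun x : Int => x) true
      rw [hpermInc.countP_eq]
      rw [List.countP_map]
      simp only [Function.comp_def]
      rw [pvFront_eq_filter (t0 :: rest) hpw (PySem.List.pyGetD t0 1 0)]
      rw [List.countP_filter]
      -- the combined predicate over tmp equals B's predicate over tmp
      have hcongr : (t0 :: rest).countP (fun row =>
            decide (s0 + s1 < pvL row + pvR row) &&
            (decide (PySem.List.pyGetD t0 1 0 ≤ pvR row) &&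
              (t0 :: rest).all (fun q => !decide (pvL q > pvL row) || decide (pvR q ≤ pvR row))))
          = (t0 :: rest).countP (fun row =>
            decide (PySem.List.pyGetD row 0 0 + PySem.List.pyGetD row 1 0 > s0 + s1) &&
            !(others.any (fun q =>
                decide (PySem.List.pyGetD q 0 0 > PySem.List.pyGetD row 0 0) &&
                decide (PySem.List.pyGetD q 1 0 > PySem.List.pyGetD row 1 0)))) := by
        apply List.countP_congr
        intro row hrow
        have ht0row : pvR t0 ≤ pvR row ∨
            (pvL t0 > pvL row ∨ (pvL t0 = pvL row ∧ pvR t0 ≤ pvR row)) := by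
          rcases List.mem_cons.mp hrow with rfl | hmem
          · exact Or.inl le_rfl
          · exact Or.inr ((List.pairwise_cons.mp hpw).1 row hmem)
        rw [Bool.eq_iff_iff]
        simp only [Bool.and_eq_true, decide_eq_true_eq, List.all_eq_true,
          Bool.not_eq_eq_eq_not, Bool.not_true, List.any_eq_false,
          Bool.or_eq_true, decide_eq_false_iff_not, iff_true,
          pvL, pvR] at ht0row ⊢
        constructor
        · rintro ⟨hsum, hth, hall⟩
          refine ⟨by omega, ?_⟩
          intro q hq
          have h := hall q (hperm.mem_iff.mpr hq)
          omega
        · rintro ⟨hsum, hany⟩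
          have hall' : ∀ q ∈ t0 :: rest,
              PySem.List.pyGetD q 0 0 > PySem.List.pyGetD row 0 0 →
                PySem.List.pyGetD q 1 0 ≤ PySem.List.pyGetD row 1 0 := by
            intro q hqT hgt
            have h := hany q (hperm.mem_iff.mp hqT)
            omega
          have hth : PySem.List.pyGetD t0 1 0 ≤ PySem.List.pyGetD row 1 0 := by
            have h0 := hall' t0 List.mem_cons_self
            omega
          refine ⟨by omega, hth, ?_⟩
          intro q hqT
          have h := hall' q hqT
          omega
      rw [hcongr, hperm.countP_eq]
      ring
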